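-- pv_equiv track=rewrite | github.com/omicsNLP/RECoDe | src/recode/utils/sentence_splitter.py | protect_dots_in_parentheses
-- ===== SOURCE A (Python) =====
-- def protect_dots_in_parentheses(text, max_lookahead=500):
--     chars = []
--     inside_par = 0
--     n = len(text)
--     i = 0
--
--     while i < n:
--         ch = text[i]
--
--         if ch == "(":
--             # Only count as inside parentheses if there's a closing ')' ahead
--             lookahead_end = min(i + max_lookahead, n)
--             if ")" in text[i:lookahead_end]:
--                 inside_par += 1
--             chars.append(ch)
--
--         elif ch == ")":
--             # Close only if we’re currently inside parentheses
--             if inside_par > 0: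
--                 inside_par -= 1
--             chars.append(ch)
--
--         elif ch == "." and inside_par > 0:
--             # Protect only if we are inside valid parentheses
--             chars.append(r"/\/\/")
--         else:
--             chars.append(ch)
--
--         i += 1
--
--     return "".join(chars)
-- ===== SOURCE B (Python) =====
-- def protect_dots_in_parentheses(text, max_lookahead=500):
--     n = len(text)
--     # one reverse pass: next_close[i] = index of the nearest ')' at position >= i, or n if none
--     next_close = [n] * (n + 1)
--     for i in range(n - 1, -1, -1):
--         next_close[i] = i if text[i] == ")" else next_close[i + 1]
--     out = []
--     depth = 0
--     for i, ch in enumerate(text):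
--         if ch == "(":
--             if next_close[i] < min(i + max_lookahead, n):
--                 depth += 1
--             out.append(ch)
--         elif ch == ")":
--             if depth > 0:
--                 depth -= 1
--             out.append(ch)
--         elif ch == "." and depth > 0:
--             out.append(r"/\/\/")
--         else:
--             out.append(ch)
--     return "".join(out)
-- ===== Notes on version B (the rewrite author's own statement) =====
-- stated objective: alternative
-- what changed: Replaces A's per-open-paren forward slice scan for a closing paren (up to max_lookahead characters each time) with a single reverse pass precomputing the nearest-closing-paren index for every position, so each lookahead test is one table lookup.
-- outside the precondition, e.g. on protect_dots_in_parentheses('(.)x', -1): A returns '(/\\/\\/)x', B returns '(.)x'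
import Mathlib
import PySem

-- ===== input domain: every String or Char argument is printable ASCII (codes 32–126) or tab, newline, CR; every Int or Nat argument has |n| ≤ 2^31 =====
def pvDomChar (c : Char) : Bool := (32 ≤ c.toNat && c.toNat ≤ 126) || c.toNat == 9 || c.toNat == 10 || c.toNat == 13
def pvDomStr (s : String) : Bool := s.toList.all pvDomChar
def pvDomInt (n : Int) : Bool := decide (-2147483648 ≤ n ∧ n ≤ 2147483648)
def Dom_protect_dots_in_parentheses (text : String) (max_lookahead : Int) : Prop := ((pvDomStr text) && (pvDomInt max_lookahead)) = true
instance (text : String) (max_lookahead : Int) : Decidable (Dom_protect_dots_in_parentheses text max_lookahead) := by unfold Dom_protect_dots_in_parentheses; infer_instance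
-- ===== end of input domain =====

-- B replaces A's per-open-paren forward slice scan by a precomputed nearest-closing-paren index table
-- (one reverse pass), so each lookahead test is a single table lookup; objective: alternative.

-- ===== PORT A =====
-- loop body of A's while-loop, step for step (")" in text[i:lookahead_end] is a single-char
-- substring test = membership of ')' in the slice, exact)
def pvStepA (cs : List Char) (ml : Int) (st : List String × Int) (i : Int) : List String × Int :=
  let chars := st.1
  let inside := st.2
  let ch := PySem.List.pyGetD cs i ' '
  if ch = '(' then
    let lookEnd := min (i + ml) (cs.length : Int)
    if PySem.Chars.isIn [')'] (PySem.List.slice cs (some i) (some lookEnd)) then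
      (chars ++ [String.singleton ch], inside + 1)
    else
      (chars ++ [String.singleton ch], inside)
  else if ch = ')' then
    if 0 < inside then (chars ++ [String.singleton ch], inside - 1)
    else (chars ++ [String.singleton ch], inside)
  else if ch = '.' ∧ 0 < inside then
    (chars ++ ["/\\/\\/"], inside)
  else
    (chars ++ [String.singleton ch], inside)

def protect_dots_in_parentheses (text : String) (max_lookahead : Int) : String :=
  let cs := text.toList
  let n : Int := cs.length
  PySem.Str.join "" (((PySem.List.pyRange 0 n 1).foldl (pvStepA cs max_lookahead) ([], 0)).1)

-- ===== PORT B =====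
-- B's reverse pass: pvNextGo k cs is the next_close array for cs starting at absolute index k;
-- entry j is the index of the nearest ')' at position ≥ k+j, or the sentinel (k + cs.length)
def pvNextGo (k : Nat) : List Char → List Nat
  | [] => [k]
  | c :: rest =>
    let tail := pvNextGo (k + 1) rest
    (if c = ')' then k else tail.getD 0 (k + 1)) :: tail

-- loop body of B's forward pass over enumerate(text)
def pvStepB (nc : List Nat) (n : Nat) (ml : Int) (st : List String × Int) (p : Int × Char) :
    List String × Int :=
  let out := st.1
  let depth := st.2
  let i := p.1
  let ch := p.2
  if ch = '(' then
    if ((nc.getD i.toNat n : Int)) < min (i + ml) (n : Int) then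
      (out ++ [String.singleton ch], depth + 1)
    else
      (out ++ [String.singleton ch], depth)
  else if ch = ')' then
    if 0 < depth then (out ++ [String.singleton ch], depth - 1)
    else (out ++ [String.singleton ch], depth)
  else if ch = '.' ∧ 0 < depth then
    (out ++ ["/\\/\\/"], depth)
  else
    (out ++ [String.singleton ch], depth)

def protect_dots_in_parentheses_alt (text : String) (max_lookahead : Int) : String :=
  let cs := text.toList
  let n := cs.length
  let nc := pvNextGo 0 cs
  PySem.Str.join ""
    (((PySem.List.enumerate cs 0).foldl (pvStepB nc n max_lookahead) ([], 0)).1)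

-- ===== PRECONDITION & SPEC =====
-- Pre_ restricts to the natural domain of a lookahead bound: it excludes negative max_lookahead,
-- on which A's slice end i+max_lookahead goes negative and Python wraps it to count from the end
-- of the string; B's table comparison naturally treats such a window as empty.
def Pre_protect_dots_in_parentheses (text : String) (max_lookahead : Int) : Prop :=
  0 ≤ max_lookahead
instance (text : String) (max_lookahead : Int) : Decidable (Pre_protect_dots_in_parentheses text max_lookahead) := by unfold Pre_protect_dots_in_parentheses; infer_instance

def pvWitness_protect_dots_in_parentheses : String × Int := ("a(b.c) d.", 500)

def Spec_protect_dots_in_parentheses (text : String) (max_lookahead : Int) (out : String) : Prop := out = protect_dots_in_parentheses_alt text max_lookahead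
instance (text : String) (max_lookahead : Int) (out : String) : Decidable (Spec_protect_dots_in_parentheses text max_lookahead out) := by unfold Spec_protect_dots_in_parentheses; infer_instance

-- ===== CLAIM (what is proved, stated in full; the proofs are below) =====
def Claim_equal_protect_dots_in_parentheses : Prop := ∀ (text : String) (max_lookahead : Int), Dom_protect_dots_in_parentheses text max_lookahead → Pre_protect_dots_in_parentheses text max_lookahead → Spec_protect_dots_in_parentheses text max_lookahead (protect_dots_in_parentheses text max_lookahead)

-- ===== LEMMAS AND PROOFS =====

-- index of the first ')' in a list, or its length if none
def pvFirstClose : List Char → Nat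
  | [] => 0
  | c :: r => if c = ')' then 0 else pvFirstClose r + 1

theorem pvFirstClose_le (l : List Char) : pvFirstClose l ≤ l.length := by
  induction l with
  | nil => simp [pvFirstClose]
  | cons c r ih =>
    by_cases h : c = ')'
    · simp [pvFirstClose, h]
    · simp [pvFirstClose, h]
      omega

theorem pvMem_take_iff (l : List Char) (t : Nat) :
    ')' ∈ l.take t ↔ pvFirstClose l < min t l.length := by
  induction l generalizing t with
  | nil => simp
  | cons c r ih =>
    cases t with
    | zero => simp
    | succ t =>
      by_cases h : c = ')'
      · subst h
        simp [pvFirstClose]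
      · have h' : ¬ (')' = c) := fun hh => h hh.symm
        simp only [List.take_succ_cons, List.mem_cons, pvFirstClose, if_neg h, h', false_or, ih t, List.length_cons]
        omega

theorem pvNextGo_getD (l : List Char) (k j : Nat) (hj : j ≤ l.length) (d : Nat) :
    (pvNextGo k l).getD j d = k + j + pvFirstClose (l.drop j) := by
  induction l generalizing k j d with
  | nil =>
    have hj0 : j = 0 := by simp at hj; omega
    subst hj0
    simp [pvNextGo, pvFirstClose]
  | cons c r ih =>
    cases j with
    | zero =>
      by_cases h : c = ')'
      · simp [pvNextGo, h, pvFirstClose]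
      · have h0 := ih (k + 1) 0 (by omega) (k + 1)
        simp only [List.drop_zero] at h0 ⊢
        simp only [pvNextGo, List.getD_cons_zero, if_neg h, pvFirstClose, h0]
        omega
    | succ j =>
      have h0 := ih (k + 1) j (by simpa using hj) d
      simp only [pvNextGo, List.getD_cons_succ, List.drop_succ_cons, h0]
      omega

theorem pvIsIn_singleton (c : Char) (l : List Char) :
    PySem.Chars.isIn [c] l = true ↔ c ∈ l := by
  rw [PySem.Chars.isIn_iff_infix]
  constructor
  · intro h
    exact List.singleton_sublist.mp h.sublist
  · intro h
    obtain ⟨s, t, rfl⟩ := List.append_of_mem h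
    exact ⟨s, t, by simp⟩

theorem pvTest_eq (cs : List Char) (ml : Int) (hml : 0 ≤ ml) (i : Nat) (hi : i < cs.length) :
    (PySem.Chars.isIn [')'] (PySem.List.slice cs (some (i : Int))
        (some (min ((i : Int) + ml) (cs.length : Int)))) = true)
    ↔ (((pvNextGo 0 cs).getD i cs.length : Int) < min ((i : Int) + ml) (cs.length : Int)) := by
  have hb : (0 : Int) ≤ min ((i : Int) + ml) (cs.length : Int) := by
    have : (0 : Int) ≤ (i : Int) + ml := by positivity
    omega
  rw [PySem.List.slice_toNat (ha := by positivity) (hb := hb), pvIsIn_singleton, pvMem_take_iff,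
    pvNextGo_getD cs 0 i (le_of_lt hi) cs.length]
  have hfc := pvFirstClose_le (cs.drop i)
  have hdl : (cs.drop i).length = cs.length - i := List.length_drop ..
  rw [hdl] at hfc
  simp only [Int.toNat_natCast, hdl]
  have htn : ((min ((i : Int) + ml) (cs.length : Int)).toNat : Int)
      = min ((i : Int) + ml) (cs.length : Int) := Int.toNat_of_nonneg hb
  omega

theorem pvStep_eq (cs : List Char) (ml : Int) (hml : 0 ≤ ml) (k : Nat) (c : Char)
    (hk : k < cs.length) (hc : cs.drop k = c :: cs.drop (k + 1)) (st : List String × Int) :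
    pvStepA cs ml st (k : Int) = pvStepB (pvNextGo 0 cs) cs.length ml st ((k : Int), c) := by
  have hch : PySem.List.pyGetD cs (k : Int) ' ' = c := by
    have h0 : cs[k]? = some c := by
      have h1 := congrArg (fun l => l[0]?) hc
      simpa [List.getElem?_drop] using h1
    rw [PySem.List.pyGetD_natCast, List.getD_eq_getElem?_getD, h0]
    rfl
  unfold pvStepA pvStepB
  simp only [hch, Int.toNat_natCast]
  by_cases h1 : c = '('
  · simp only [h1, if_true]
    have := pvTest_eq cs ml hml k hk
    by_cases h2 : ((pvNextGo 0 cs).getD k cs.length : Int) < min ((k : Int) + ml) (cs.length : Int)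
    · rw [if_pos (this.mpr h2), if_pos h2]
    · rw [if_neg (fun hh => h2 (this.mp hh)), if_neg h2]
  · simp [h1]

theorem pvLoop_eq (cs : List Char) (ml : Int) (hml : 0 ≤ ml) :
    ∀ (suf : List Char) (k : Nat), cs.drop k = suf → ∀ st : List String × Int,
      (PySem.List.pyRange (k : Int) (cs.length : Int) 1).foldl (pvStepA cs ml) st
        = (PySem.List.enumerate suf (k : Int)).foldl (pvStepB (pvNextGo 0 cs) cs.length ml) st := by
  intro suf
  induction suf with
  | nil =>
    intro k hk st
    have hn : cs.length ≤ k := by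
      have := congrArg List.length hk
      simp at this
      omega
    rw [PySem.List.pyRange_one_eq_nil (by exact_mod_cast hn), PySem.List.enumerate_nil]
    rfl
  | cons c rest ih =>
    intro k hk st
    have hlt : k < cs.length := by
      by_contra h
      rw [List.drop_eq_nil_of_le (by omega)] at hk
      simp at hk
    have hrest : cs.drop (k + 1) = rest := by
      have := congrArg List.tail hk
      simpa [List.tail_drop] using this
    have hc : cs.drop k = c :: cs.drop (k + 1) := by rw [hk, hrest]
    rw [PySem.List.pyRange_one_cons (by exact_mod_cast hlt), PySem.List.enumerate_cons,
      List.foldl_cons, List.foldl_cons, pvStep_eq cs ml hml k c hlt hc st]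
    have := ih (k + 1) hrest (pvStepB (pvNextGo 0 cs) cs.length ml st ((k : Int), c))
    push_cast at this ⊢
    rw [this]

-- ===== VERDICT (by name: the statement is the Claim_ definition above) =====
theorem protect_dots_in_parentheses_spec : Claim_equal_protect_dots_in_parentheses := by
  intro text ml _ hml
  unfold Spec_protect_dots_in_parentheses
  simp only [protect_dots_in_parentheses, protect_dots_in_parentheses_alt]
  have h := pvLoop_eq text.toList ml hml text.toList 0 rfl ([], 0)
  simp only [Nat.cast_zero] at h
  rw [h]
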